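-- pv_equiv track=rewrite | github.com/niko-zvt/n2-param | n2_param/export/sheet_export.py | merge_sheet_blocks
-- ===== SOURCE A (Python) =====
-- from collections.abc import Callable, Sequence
--
-- def merge_sheet_blocks(
--     blocks: Sequence[Sequence[Sequence[str]]],
--     gap_columns: int = 2,
-- ) -> list[list[str]]:
--     """
--     Place multiple sample blocks side by side, separated by empty column gaps, row-aligned to max height.
--
--     For each block, column width is the maximum row length in that block; every row in the block
--     is right-padded to that width. Global height is the maximum of block row counts; shorter
--     blocks are bottom-padded with empty rows.
--
--     Parameters:
--         blocks: Non-empty list of 2D string grids (one per sample).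
--         gap_columns: Number of empty columns between adjacent blocks (default: 2).
--
--     Returns:
--         A single 2D grid. Empty if ``blocks`` is empty.
--     """
--     if gap_columns < 0:
--         raise ValueError("gap_columns must be non-negative")
--     if not blocks:
--         return []
--     block_lists = [[list(r) for r in b] for b in blocks]
--     widths: list[int] = [max((len(x) for x in bl), default=0) for bl in block_lists]
--     h_max = max((len(b) for b in block_lists), default=0)
--     padded: list[list[list[str]]] = []
--     for bi, bl in enumerate(block_lists):
--         w_i = widths[bi]
--         pbi: list[list[str]] = []
--         for r_i in range(h_max):
--             if r_i < len(bl):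
--                 row = bl[r_i] + [""] * (w_i - len(bl[r_i]))
--                 pbi.append(row[:w_i] if w_i else [])
--             else:
--                 pbi.append([""] * w_i)
--         padded.append(pbi)
--     out: list[list[str]] = []
--     for r_i in range(h_max):
--         line: list[str] = []
--         for bi, block in enumerate(padded):
--             if bi > 0:
--                 line.extend([""] * gap_columns)
--             line.extend(block[r_i])
--         out.append(line)
--     return out
-- ===== SOURCE B (Python) =====
-- def merge_sheet_blocks(blocks, gap_columns=2):
--     if gap_columns < 0:
--         raise ValueError("gap_columns must be non-negative")
--     if not blocks:
--         return []
--     widths = [max((len(r) for r in b), default=0) for b in blocks]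
--     h_max = max(len(b) for b in blocks)
--     gap = [""] * gap_columns
--     out = []
--     for r in range(h_max):
--         line = []
--         seen = False
--         for b, w in zip(blocks, widths):
--             if seen:
--                 line += gap
--             seen = True
--             row = list(b[r]) if r < len(b) else []
--             line += row + [""] * (w - len(row))
--         out.append(line)
--     return out
-- ===== Notes on version B (the rewrite author's own statement) =====
-- stated objective: simpler
-- what changed: Drops A's intermediate padded 3D table and its dead truncation/w==0 special cases; B builds each output row directly in one row-major pass over (block, width) pairs.
import Mathlib
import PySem

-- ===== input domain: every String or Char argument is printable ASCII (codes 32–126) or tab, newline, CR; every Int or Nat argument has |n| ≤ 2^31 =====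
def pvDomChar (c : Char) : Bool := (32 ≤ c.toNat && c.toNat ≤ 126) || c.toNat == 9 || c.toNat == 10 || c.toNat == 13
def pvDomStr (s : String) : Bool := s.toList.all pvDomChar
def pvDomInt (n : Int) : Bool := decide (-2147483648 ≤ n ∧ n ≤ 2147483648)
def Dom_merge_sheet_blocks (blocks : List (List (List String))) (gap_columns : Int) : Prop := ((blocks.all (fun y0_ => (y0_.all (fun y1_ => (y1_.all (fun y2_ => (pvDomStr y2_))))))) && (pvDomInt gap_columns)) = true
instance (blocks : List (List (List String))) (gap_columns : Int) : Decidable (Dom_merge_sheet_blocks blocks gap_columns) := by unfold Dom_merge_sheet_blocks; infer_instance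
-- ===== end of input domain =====

-- B drops A's intermediate padded 3D table (and its dead truncation / w==0 branches) and builds each
-- output row directly in one row-major pass over (block, width) pairs; simpler, same cost.


-- ===== PORT A =====
-- Literal port of A. `block_lists = [[list(r) for r in b] for b in blocks]` is a deep copy,
-- the identity on immutable Lean lists, so `blocks` is used directly. `widths[bi]` is ported as
-- `.getD p.1.toNat 0` (exact: bi is always in range). The output loop appending to `out` over
-- range(h_max) is the map over List.range h_max.
def merge_sheet_blocks (blocks : List (List (List String))) (gap_columns : Int) : List (List String) :=
  if blocks = [] then []
  else
    let widths : List Nat := blocks.map (fun bl => (bl.map List.length).foldl max 0)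
    let h_max : Nat := (blocks.map List.length).foldl max 0
    let padded : List (List (List String)) :=
      (PySem.List.enumerate blocks 0).map (fun p =>
        let w_i : Nat := widths.getD p.1.toNat 0
        (List.range h_max).map (fun r_i =>
          if r_i < p.2.length then
            let row := p.2.getD r_i [] ++ List.replicate (w_i - (p.2.getD r_i []).length) ""
            if w_i ≠ 0 then row.take w_i else []
          else List.replicate w_i ""))
    (List.range h_max).map (fun r_i =>
      (PySem.List.enumerate padded 0).foldl (fun line q =>
        (if q.1 > 0 then line ++ List.replicate gap_columns.toNat "" else line) ++ q.2.getD r_i []) [])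

-- ===== PORT B =====
-- Literal port of Source B: one row-major pass; the inner loop's state is the pair (line, seen).
def merge_sheet_blocks_alt (blocks : List (List (List String))) (gap_columns : Int) : List (List String) :=
  if blocks = [] then []
  else
    let widths : List Nat := blocks.map (fun b => (b.map List.length).foldl max 0)
    let h_max : Nat := (blocks.map List.length).foldl max 0
    let gap : List String := List.replicate gap_columns.toNat ""
    (List.range h_max).map (fun r =>
      ((blocks.zip widths).foldl (fun (acc : List String × Bool) p =>
          let row := if r < p.1.length then p.1.getD r [] else []
          ((if acc.2 then acc.1 ++ gap else acc.1) ++ (row ++ List.replicate (p.2 - row.length) ""), true))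
        ([], false)).1)

-- ===== PRECONDITION & SPEC =====
-- Pre_ excludes exactly gap_columns < 0, on which A (and B) raises ValueError.
def Pre_merge_sheet_blocks (blocks : List (List (List String))) (gap_columns : Int) : Prop :=
  0 ≤ gap_columns
instance (blocks : List (List (List String))) (gap_columns : Int) : Decidable (Pre_merge_sheet_blocks blocks gap_columns) := by unfold Pre_merge_sheet_blocks; infer_instance

def pvWitness_merge_sheet_blocks : List (List (List String)) × Int :=
  ([[["a"]], [["b", "c"], ["d"]]], 1)

def Spec_merge_sheet_blocks (blocks : List (List (List String))) (gap_columns : Int) (out : List (List String)) : Prop := out = merge_sheet_blocks_alt blocks gap_columns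
instance (blocks : List (List (List String))) (gap_columns : Int) (out : List (List String)) : Decidable (Spec_merge_sheet_blocks blocks gap_columns out) := by unfold Spec_merge_sheet_blocks; infer_instance

-- ===== CLAIM (what is proved, stated in full; the proofs are below) =====
def Claim_equal_merge_sheet_blocks : Prop := ∀ (blocks : List (List (List String))) (gap_columns : Int), Dom_merge_sheet_blocks blocks gap_columns → Pre_merge_sheet_blocks blocks gap_columns → Spec_merge_sheet_blocks blocks gap_columns (merge_sheet_blocks blocks gap_columns)

-- ===== LEMMAS AND PROOFS =====

lemma foldl_max_init (l : List Nat) (a : Nat) : a ≤ l.foldl max a := by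
  induction l generalizing a with
  | nil => simp
  | cons y l ih => exact le_trans (le_max_left a y) (ih (max a y))

lemma le_foldl_max (l : List Nat) (a : Nat) {x : Nat} (hx : x ∈ l) : x ≤ l.foldl max a := by
  induction l generalizing a with
  | nil => cases hx
  | cons y l ih =>
    rcases List.mem_cons.1 hx with rfl | h
    · exact le_trans (le_max_right a x) (foldl_max_init l (max a x))
    · exact ih _ h

-- the widths[bi] lookup over enumerate collapses to a plain map over the blocks
lemma map_enumerate_getD {α γ β : Type} (l : List α) (f : α → γ) (d : γ) (G : γ → α → β) :
    (PySem.List.enumerate l 0).map (fun p => G ((l.map f).getD p.1.toNat d) p.2)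
      = l.map (fun a => G (f a) a) := by
  apply List.ext_getElem
  · simp [PySem.List.length_enumerate]
  · intro k h1 h2
    have hk : k < l.length := by simpa [PySem.List.length_enumerate] using h1
    simp [PySem.List.getElem_enumerate, List.getD_eq_getElem?_getD,
      List.getElem?_eq_getElem hk]

-- A's fold over the enumerated padded table equals B's flag-carrying fold over (block, width) pairs
lemma fold_gap_flag {a : Type} (G : a -> List (List String)) (W : a -> Nat)
    (eB : a × Nat -> List String) (gap : List String) (r : Nat) :
    ∀ (l : List a), (∀ x ∈ l, (G x).getD r [] = eB (x, W x)) →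
    ∀ (s : Int) (line : List String) (flag : Bool), 0 ≤ s → (flag = true ↔ 0 < s) →
    (PySem.List.enumerate (l.map G) s).foldl
        (fun line q => (if q.1 > 0 then line ++ gap else line) ++ q.2.getD r []) line
      = ((l.zip (l.map W)).foldl
          (fun acc p => ((if acc.2 then acc.1 ++ gap else acc.1) ++ eB p, true)) (line, flag)).1 := by
  intro l
  induction l with
  | nil => intro _ s line flag _ _; simp [PySem.List.enumerate_nil]
  | cons x l ih =>
    intro he s line flag hs hflag
    have hif : (if s > 0 then line ++ gap else line) = (if flag then line ++ gap else line) := by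
      by_cases h : 0 < s
      · simp [h, hflag.2 h]
      · have hf : flag = false := by
          cases flag
          · rfl
          · exact absurd (hflag.1 rfl) h
        simp [hf, if_neg h]
    simp only [List.map_cons, PySem.List.enumerate_cons, List.zip_cons_cons, List.foldl]
    rw [hif, he x (List.mem_cons_self)]
    exact ih (fun y hy => he y (List.mem_cons_of_mem _ hy)) (s + 1) _ true (by omega)
      ⟨fun _ => by omega, fun _ => rfl⟩

-- A's padded row (with its dead truncation and w = 0 branches) equals B's direct row
lemma rowA_eq_rowB (bl : List (List String)) (w r : Nat)
    (hw : ∀ x ∈ bl, x.length ≤ w) :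
    (if r < bl.length then
        (if w ≠ 0 then (bl.getD r [] ++ List.replicate (w - (bl.getD r []).length) "").take w else [])
      else List.replicate w "")
    = (if r < bl.length then bl.getD r [] else [])
        ++ List.replicate (w - (if r < bl.length then bl.getD r [] else []).length) "" := by
  by_cases hr : r < bl.length
  · have hmem : bl.getD r [] ∈ bl := by
      rw [List.getD_eq_getElem _ _ hr]; exact List.getElem_mem hr
    have hle : (bl.getD r []).length ≤ w := hw _ hmem
    rw [if_pos hr, if_pos hr]
    by_cases hw0 : w = 0
    · have hnil : bl.getD r [] = [] := List.length_eq_zero_iff.1 (by omega)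
      rw [if_neg (by simp [hw0]), hnil]
      simp [hw0]
    · rw [if_pos hw0]
      exact List.take_of_length_le (by rw [List.length_append, List.length_replicate]; omega)
  · rw [if_neg hr, if_neg hr]
    simp

theorem merge_sheet_blocks_equal (blocks : List (List (List String))) (gap_columns : Int) :
    merge_sheet_blocks blocks gap_columns = merge_sheet_blocks_alt blocks gap_columns := by
  simp only [merge_sheet_blocks, merge_sheet_blocks_alt]
  by_cases hb : blocks = []
  · simp [hb]
  · simp only [if_neg hb]
    apply List.map_congr_left
    intro r hr
    have hrlt : r < (blocks.map List.length).foldl max 0 := List.mem_range.1 hr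
    rw [map_enumerate_getD blocks (fun bl => (bl.map List.length).foldl max 0) 0
      (fun w_i bl => (List.range ((blocks.map List.length).foldl max 0)).map (fun r_i =>
        if r_i < bl.length then
          if w_i ≠ 0 then (bl.getD r_i [] ++ List.replicate (w_i - (bl.getD r_i []).length) "").take w_i else []
        else List.replicate w_i ""))]
    refine fold_gap_flag _ _
      (fun p => (if r < p.1.length then p.1.getD r [] else [])
        ++ List.replicate (p.2 - (if r < p.1.length then p.1.getD r [] else []).length) "")
      (List.replicate gap_columns.toNat "") r blocks ?_ 0 [] false le_rfl (by simp)
    intro bl hbl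
    rw [List.getD_eq_getElem _ _ (by simpa using hrlt)]
    simp only [List.getElem_map, List.getElem_range]
    exact rowA_eq_rowB bl _ r (fun x hx => le_foldl_max _ 0 (List.mem_map_of_mem hx))

-- ===== VERDICT (by name: the statement is the Claim_ definition above) =====
theorem merge_sheet_blocks_spec : Claim_equal_merge_sheet_blocks := by
  intro blocks gap_columns _ _
  unfold Spec_merge_sheet_blocks
  exact merge_sheet_blocks_equal blocks gap_columns
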